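-- pv_equiv track=rewrite | github.com/lttdvrs/NAPC-2024 | pset10/solution.py | solution
-- ===== SOURCE A (Python) =====
-- def solution(n,s,t):
--     t.sort(reverse=True)
--     r = t[0]
--     for i in range(1,len(t)):
--         if s>=r:
--             return 'Nee'
--         r=min(r-s,t[i])
--     return 'Ja'
-- ===== SOURCE B (Python) =====
-- def solution(n, s, t):
--     # Sorts t in place (same observable mutation as the original).
--     t.sort(reverse=True)
--     m = len(t)
--     for j in range(m - 1):
--         if t[j] <= s * (m - 1 - j):
--             return 'Nee'
--     return 'Ja'
-- ===== Notes on version B (the rewrite author's own statement) =====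
-- stated objective: alternative
-- what changed: Replaces the threaded running minimum r = min(r - s, t[i]) with a direct per-position threshold test t[j] <= s*(m-1-j) obtained by unrolling the recurrence, so no running state is maintained.
import Mathlib
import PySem

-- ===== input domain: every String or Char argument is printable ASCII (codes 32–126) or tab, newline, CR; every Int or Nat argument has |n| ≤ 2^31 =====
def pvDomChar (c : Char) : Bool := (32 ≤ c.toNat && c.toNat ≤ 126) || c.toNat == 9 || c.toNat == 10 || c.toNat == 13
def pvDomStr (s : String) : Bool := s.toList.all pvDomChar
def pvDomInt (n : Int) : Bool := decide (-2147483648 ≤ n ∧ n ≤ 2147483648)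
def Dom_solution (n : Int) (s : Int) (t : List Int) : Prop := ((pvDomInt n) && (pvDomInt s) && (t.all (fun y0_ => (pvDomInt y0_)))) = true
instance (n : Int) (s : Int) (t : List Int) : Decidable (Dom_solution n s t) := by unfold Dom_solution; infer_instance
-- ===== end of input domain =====

-- B replaces A's threaded running minimum with a direct per-position threshold test
-- t[j] <= s*(m-1-j) over the same descending sort (same in-place sort mutation as A);
-- equivalence is about the return value.

-- ===== PORT A =====
-- for i in range(1, len(t)): if s >= r: return 'Nee'; r = min(r - s, t[i])
def solutionLoopA (s : Int) : Int → List Int → String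
  | _, [] => "Ja"
  | r, x :: xs => if s ≥ r then "Nee" else solutionLoopA s (min (r - s) x) xs

def solution (n : Int) (s : Int) (t : List Int) : String :=
  let ts := PySem.List.sorted t (fun x => x) true   -- t.sort(reverse=True)
  match PySem.List.pyGet? ts 0 with                 -- r = t[0]  (IndexError on empty t: outside Pre_)
  | none => ""
  | some r => solutionLoopA s r (ts.drop 1)

-- ===== PORT B =====
-- for j in range(m-1): if t[j] <= s*(m-1-j): return 'Nee'  — structural recursion over the
-- sorted list; the element at index j is the head, m-1-j is the length of its tail.
def solutionLoopB (s : Int) : List Int → String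
  | [] => "Ja"
  | [_] => "Ja"
  | x :: y :: xs => if x ≤ s * ((xs.length : Int) + 1) then "Nee" else solutionLoopB s (y :: xs)

def solution_alt (n : Int) (s : Int) (t : List Int) : String :=
  solutionLoopB s (PySem.List.sorted t (fun x => x) true)

-- ===== PRECONDITION & SPEC =====
-- A raises IndexError (t[0]) on empty t; Pre_ excludes exactly that.
def Pre_solution (n : Int) (s : Int) (t : List Int) : Prop := t ≠ []
instance (n : Int) (s : Int) (t : List Int) : Decidable (Pre_solution n s t) := by unfold Pre_solution; infer_instance
def pvWitness_solution : Int × Int × List Int := (0, 1, [3, 1])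

def Spec_solution (n : Int) (s : Int) (t : List Int) (out : String) : Prop := out = solution_alt n s t
instance (n : Int) (s : Int) (t : List Int) (out : String) : Decidable (Spec_solution n s t out) := by unfold Spec_solution; infer_instance

-- ===== CLAIM (what is proved, stated in full; the proofs are below) =====
def Claim_equal_solution : Prop := ∀ (n : Int) (s : Int) (t : List Int), Dom_solution n s t → Pre_solution n s t → Spec_solution n s t (solution n s t)

-- ===== LEMMAS AND PROOFS =====

-- 'Nee' predicate of A's loop: ∃ step where s ≥ r holds.
def NAp (s : Int) : Int → List Int → Prop
  | _, [] => False
  | r, x :: xs => s ≥ r ∨ NAp s (min (r - s) x) xs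

-- a ≤ s*k for some horizon k ∈ [1, m]
def Efin (s a : Int) (m : Nat) : Prop := ∃ k : Nat, 1 ≤ k ∧ k ≤ m ∧ a ≤ s * (k : Int)

-- per-element Efin over the whole list (each element with its tail length as horizon)
def NAfull (s : Int) : List Int → Prop
  | [] => False
  | x :: xs => Efin s x xs.length ∨ NAfull s xs

-- 'Nee' predicate of B's loop: some non-last element x with tail length q has x ≤ s*q.
def NBp (s : Int) : List Int → Prop
  | [] => False
  | [_] => False
  | x :: y :: xs => x ≤ s * ((xs.length : Int) + 1) ∨ NBp s (y :: xs)

theorem loopA_nee (s : Int) : ∀ (l : List Int) (r : Int), NAp s r l → solutionLoopA s r l = "Nee" := by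
  intro l
  induction l with
  | nil => intro r h; exact absurd h (by simp [NAp])
  | cons x xs ih =>
    intro r h
    simp only [NAp] at h
    simp only [solutionLoopA]
    rcases h with h | h
    · simp [h]
    · split
      · rfl
      · exact ih _ h

theorem loopA_ja (s : Int) : ∀ (l : List Int) (r : Int), ¬ NAp s r l → solutionLoopA s r l = "Ja" := by
  intro l
  induction l with
  | nil => intro r _; rfl
  | cons x xs ih =>
    intro r h
    simp only [NAp] at h
    push_neg at h
    simp only [solutionLoopA]
    rw [if_neg (not_le.mpr h.1)]
    exact ih _ h.2

theorem loopB_nee (s : Int) : ∀ (l : List Int), NBp s l → solutionLoopB s l = "Nee" := by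
  intro l
  induction l with
  | nil => intro h; exact absurd h (by simp [NBp])
  | cons x xs ih =>
    intro h
    cases xs with
    | nil => exact absurd h (by simp [NBp])
    | cons y ys =>
      simp only [NBp] at h
      simp only [solutionLoopB]
      rcases h with h | h
      · simp [h]
      · split
        · rfl
        · exact ih h

theorem loopB_ja (s : Int) : ∀ (l : List Int), ¬ NBp s l → solutionLoopB s l = "Ja" := by
  intro l
  induction l with
  | nil => intro _; rfl
  | cons x xs ih =>
    intro h
    cases xs with
    | nil => rfl
    | cons y ys =>
      simp only [NBp] at h
      push_neg at h
      simp only [solutionLoopB]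
      rw [if_neg (not_le.mpr h.1)]
      exact ih h.2

-- Unrolling A's recurrence: NAp s r l holds iff r or some element of l dips below s*k within its horizon.
theorem nap_iff_nafull (s : Int) : ∀ (l : List Int) (r : Int), NAp s r l ↔ (Efin s r l.length ∨ NAfull s l) := by
  intro l
  induction l with
  | nil =>
    intro r
    simp only [NAp, NAfull, Efin, List.length_nil]
    constructor
    · intro h; exact absurd h (by simp)
    · rintro (⟨k, h1, h2, _⟩ | h)
      · omega
      · exact h
  | cons x xs ih =>
    intro r
    simp only [NAp, NAfull, List.length_cons]
    rw [ih]
    have hmin : Efin s (min (r - s) x) xs.length ↔ (Efin s (r - s) xs.length ∨ Efin s x xs.length) := by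
      simp only [Efin]
      constructor
      · rintro ⟨k, h1, h2, h3⟩
        rcases min_le_iff.mp h3 with h | h
        · exact Or.inl ⟨k, h1, h2, h⟩
        · exact Or.inr ⟨k, h1, h2, h⟩
      · rintro (⟨k, h1, h2, h3⟩ | ⟨k, h1, h2, h3⟩)
        · exact ⟨k, h1, h2, le_trans (min_le_left _ _) h3⟩
        · exact ⟨k, h1, h2, le_trans (min_le_right _ _) h3⟩
    rw [hmin]
    have hshift : (s ≥ r ∨ Efin s (r - s) xs.length) ↔ Efin s r (xs.length + 1) := by
      simp only [Efin]
      constructor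
      · rintro (h | ⟨k, h1, h2, h3⟩)
        · exact ⟨1, by omega, by omega, by push_cast; omega⟩
        · refine ⟨k + 1, by omega, by omega, ?_⟩
          push_cast
          push_cast at h3
          nlinarith
      · rintro ⟨k, h1, h2, h3⟩
        rcases Nat.eq_or_lt_of_le h1 with h | h
        · left; simp [← h] at h3; omega
        · right
          refine ⟨k - 1, by omega, by omega, ?_⟩
          have hk : ((k - 1 : Nat) : Int) = (k : Int) - 1 := by omega
          rw [hk]
          nlinarith
    tauto

-- On a descending-sorted list the per-element horizon test collapses to the single
-- threshold test at the maximal horizon (k = tail length).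
theorem nafull_iff_nbp (s : Int) : ∀ (l : List Int), l.Pairwise (fun a b => b ≤ a) → (NAfull s l ↔ NBp s l) := by
  intro l
  induction l with
  | nil => intro _; simp [NAfull, NBp]
  | cons x xs ih =>
    intro hp
    have hp' := (List.pairwise_cons.mp hp).2
    have hxle := (List.pairwise_cons.mp hp).1
    cases xs with
    | nil =>
      simp only [NAfull, NBp, List.length_nil, Efin]
      constructor
      · rintro (⟨k, h1, h2, _⟩ | h)
        · omega
        · exact absurd h (by simp [NAfull])
      · intro h; exact absurd h (by simp)
    | cons y ys =>
      simp only [NAfull, NBp, List.length_cons] at *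
      rw [← ih hp']
      constructor
      · rintro (⟨k, h1, h2, h3⟩ | h)
        · by_cases hs : 0 ≤ s
          · left
            have : s * (k : Int) ≤ s * ((ys.length : Int) + 1) := by
              have : (k : Int) ≤ (ys.length : Int) + 1 := by push_cast; omega
              nlinarith
            linarith
          · push_neg at hs
            have hxs : x ≤ s := by
              have : s * (k : Int) ≤ s * 1 := by
                have : (1 : Int) ≤ (k : Int) := by push_cast; omega
                nlinarith
              linarith
            cases ys with
            | nil =>
              left; simpa using hxs
            | cons z zs =>
              right
              left
              refine ⟨1, by omega, by simp, ?_⟩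
              have : y ≤ x := hxle y (by simp)
              push_cast
              linarith
        · exact Or.inr h
      · rintro (h | h)
        · left
          exact ⟨ys.length + 1, by omega, le_refl _, by push_cast; push_cast at h; linarith⟩
        · exact Or.inr h

-- ===== VERDICT (by name: the statement is the Claim_ definition above) =====
theorem solution_spec : Claim_equal_solution := by
  intro n s t _ hpre
  unfold Spec_solution solution solution_alt
  have hne : PySem.List.sorted t (fun x => x) true ≠ [] := by
    rw [Ne, PySem.List.sorted_eq_nil_iff]; exact hpre
  cases hts : PySem.List.sorted t (fun x => x) true with
  | nil => exact absurd hts hne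
  | cons r rest =>
    have hpw : (r :: rest).Pairwise (fun a b => b ≤ a) := by
      have := PySem.List.sorted_pairwise_rev (xs := t) (key := fun x : Int => x)
      rw [hts] at this
      exact this
    simp only [PySem.List.pyGet?, PySem.List.pyIdx?, List.length_cons, List.drop_one,
      List.tail_cons]
    norm_num
    by_cases h : NAp s r rest
    · rw [loopA_nee s rest r h, loopB_nee s (r :: rest)]
      rw [← nafull_iff_nbp s _ hpw]
      simp only [NAfull]
      exact (nap_iff_nafull s rest r).mp h
    · rw [loopA_ja s rest r h, loopB_ja s (r :: rest)]
      rw [← nafull_iff_nbp s _ hpw]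
      intro hc
      exact h ((nap_iff_nafull s rest r).mpr (by simpa [NAfull] using hc))
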